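-- pv_equiv track=rewrite | github.com/enjoy-digital/litex | litex/soc/cores/ecc.py | compute_cover_positions
-- ===== SOURCE A (Python) =====
-- def compute_cover_positions(m, p):
--     """
--     Compute the positions of the bits covered by a syndrome bit.
--
--     This function computes the positions of the bits covered by a syndrome bit in the codeword, given
--     the number of syndrome bits, `m`, and the position of the syndrome bit, `p`.
--
--     Args:
--         m (int): The number of syndrome bits.
--         p (int): The position of the syndrome bit.
--
--     Returns:
--         list: A list of the positions of the bits covered by the syndrome bit in the codeword.
--     """
--     r = []
--     i = p
--     while i <= m:
--         for j in range(min(p, m - i + 1)):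
--             r.append(i + j)
--         i += 2*p
--     return r
-- ===== SOURCE B (Python) =====
-- def compute_cover_positions(m, p):
--     return [k for k in range(p, m + 1) if (k - p) % (2 * p) < p]
-- ===== Notes on version B (the rewrite author's own statement) =====
-- stated objective: simpler
-- what changed: Replaces the block-stepping while loop (jump i by 2*p, emit a run of min(p, m-i+1) positions) with a single comprehension over all candidates p..m that keeps k when (k-p) mod 2*p falls in the first half-period.
import Mathlib
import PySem

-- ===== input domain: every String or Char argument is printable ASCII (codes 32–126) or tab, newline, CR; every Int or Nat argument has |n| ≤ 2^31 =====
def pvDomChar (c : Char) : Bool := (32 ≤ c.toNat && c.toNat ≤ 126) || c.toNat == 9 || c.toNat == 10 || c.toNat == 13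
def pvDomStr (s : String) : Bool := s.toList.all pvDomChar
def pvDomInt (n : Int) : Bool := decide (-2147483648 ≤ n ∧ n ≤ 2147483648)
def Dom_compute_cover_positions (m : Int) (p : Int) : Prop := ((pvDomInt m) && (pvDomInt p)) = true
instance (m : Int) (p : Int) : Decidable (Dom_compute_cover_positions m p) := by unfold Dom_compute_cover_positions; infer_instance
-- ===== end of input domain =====

-- B replaces A's block-stepping while loop by one filtered range over all candidates (objective: simpler).

-- ===== PORT A =====
-- while i <= m: for j in range(min(p, m-i+1)): r.append(i+j); i += 2*p
-- (the '1 ≤ p' conjunct only totalizes the loop; for p ≤ 0 with p ≤ m the Python diverges, excluded by Pre_)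
def coverLoopA (m p i : Int) : List Int :=
  if _h : 1 ≤ p ∧ i ≤ m then
    ((PySem.List.pyRange 0 (min p (m - i + 1)) 1).map (fun j => i + j)) ++ coverLoopA m p (i + 2 * p)
  else []
termination_by (m + 1 - i).toNat
decreasing_by omega

def compute_cover_positions (m : Int) (p : Int) : List Int :=
  coverLoopA m p p

-- ===== PORT B =====
def compute_cover_positions_alt (m : Int) (p : Int) : List Int :=
  (PySem.List.pyRange p (m + 1) 1).filter (fun k => decide (PySem.Int.mod (k - p) (2 * p) < p))

-- ===== PRECONDITION & SPEC =====
-- Pre_ excludes exactly the inputs (p ≤ 0 with p ≤ m) on which the Python A loops forever (never returns).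
def Pre_compute_cover_positions (m : Int) (p : Int) : Prop := 1 ≤ p ∨ m < p
instance (m : Int) (p : Int) : Decidable (Pre_compute_cover_positions m p) := by unfold Pre_compute_cover_positions; infer_instance
def pvWitness_compute_cover_positions : Int × Int := (20, 4)

def Spec_compute_cover_positions (m : Int) (p : Int) (out : List Int) : Prop := out = compute_cover_positions_alt m p
instance (m : Int) (p : Int) (out : List Int) : Decidable (Spec_compute_cover_positions m p out) := by unfold Spec_compute_cover_positions; infer_instance

-- ===== CLAIM (what is proved, stated in full; the proofs are below) =====
def Claim_equal_compute_cover_positions : Prop := ∀ (m : Int) (p : Int), Dom_compute_cover_positions m p → Pre_compute_cover_positions m p → Spec_compute_cover_positions m p (compute_cover_positions m p)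

-- ===== LEMMAS AND PROOFS =====

-- the predicate B filters with, at an offset i = p + 2*p*k₀ from p
lemma pred_eval (p i k₀ x : Int) (hp : 1 ≤ p) (hi : i = p + 2 * p * k₀)
    (h1 : i ≤ x) (h2 : x < i + 2 * p) :
    (decide (PySem.Int.mod (x - p) (2 * p) < p)) = decide (x - i < p) := by
  have h2p : (0:Int) < 2 * p := by omega
  have hx : x - p = (x - i) + 2 * p * k₀ := by omega
  rw [PySem.Int.mod_eq_emod_of_pos h2p, hx, Int.add_mul_emod_self_left,
    Int.emod_eq_of_lt (by omega) (by omega)]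

lemma filter_true_seg (p i k₀ a b : Int) (hp : 1 ≤ p) (hi : i = p + 2 * p * k₀)
    (ha : i ≤ a) (hb : b ≤ i + p) :
    (PySem.List.pyRange a b 1).filter (fun k => decide (PySem.Int.mod (k - p) (2 * p) < p))
      = PySem.List.pyRange a b 1 := by
  rw [List.filter_eq_self]
  intro x hx
  rw [PySem.List.mem_pyRange_one] at hx
  rw [pred_eval p i k₀ x hp hi (by omega) (by omega)]
  exact decide_eq_true (by omega)

lemma filter_false_seg (p i k₀ a b : Int) (hp : 1 ≤ p) (hi : i = p + 2 * p * k₀)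
    (ha : i + p ≤ a) (hb : b ≤ i + 2 * p) :
    (PySem.List.pyRange a b 1).filter (fun k => decide (PySem.Int.mod (k - p) (2 * p) < p))
      = [] := by
  rw [List.filter_eq_nil_iff]
  intro x hx
  rw [PySem.List.mem_pyRange_one] at hx
  rw [pred_eval p i k₀ x hp hi (by omega) (by omega)]
  simp; omega

lemma map_add_pyRange (i n : Int) :
    (PySem.List.pyRange 0 n 1).map (fun j => i + j) = PySem.List.pyRange i (i + n) 1 := by
  rw [PySem.List.pyRange_one, PySem.List.pyRange_one, List.map_map]
  have : (i + n - i).toNat = (n - 0).toNat := by omega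
  rw [this]
  apply List.map_congr_left
  intro x _
  simp

lemma loop_eq (n : Nat) : ∀ (m p i k₀ : Int), 1 ≤ p → 0 ≤ k₀ → i = p + 2 * p * k₀ →
    (m + 1 - i).toNat ≤ n →
    coverLoopA m p i
      = (PySem.List.pyRange i (m + 1) 1).filter (fun k => decide (PySem.Int.mod (k - p) (2 * p) < p)) := by
  induction n with
  | zero =>
    intro m p i k₀ hp _ _ hn
    have him : m < i := by omega
    rw [coverLoopA, dif_neg (by omega), PySem.List.pyRange_one_eq_nil (by omega)]
    simp
  | succ n ih =>
    intro m p i k₀ hp hk hi hn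
    by_cases him : i ≤ m
    · rw [coverLoopA, dif_pos ⟨hp, him⟩,
        ih m p (i + 2 * p) (k₀ + 1) hp (by omega) (by rw [hi]; ring) (by omega)]
      by_cases hfull : i + 2 * p ≤ m + 1
      · -- full block: split [i, m+1) at i+p and i+2p
        rw [PySem.List.pyRange_one_append i (i + p) (m + 1) (by omega) (by omega),
          PySem.List.pyRange_one_append (i + p) (i + 2 * p) (m + 1) (by omega) (by omega)]
        rw [List.filter_append, List.filter_append,
          filter_true_seg p i k₀ i (i + p) hp hi (by omega) (by omega),
          filter_false_seg p i k₀ (i + p) (i + 2 * p) hp hi (by omega) (by omega)]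
        have hmin : min p (m - i + 1) = p := by omega
        rw [hmin, map_add_pyRange]
        simp
      · -- last, possibly partial block
        have htail : PySem.List.pyRange (i + 2 * p) (m + 1) 1 = [] :=
          PySem.List.pyRange_one_eq_nil (by omega)
        rw [htail]
        by_cases hhalf : i + p ≤ m + 1
        · -- run of full length p, second half truncated
          rw [PySem.List.pyRange_one_append i (i + p) (m + 1) (by omega) (by omega),
            List.filter_append,
            filter_true_seg p i k₀ i (i + p) hp hi (by omega) (by omega),
            filter_false_seg p i k₀ (i + p) (m + 1) hp hi (by omega) (by omega)]
          have hmin : min p (m - i + 1) = p := by omega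
          rw [hmin, map_add_pyRange]
          simp
        · -- run truncated to m - i + 1
          rw [filter_true_seg p i k₀ i (m + 1) hp hi (by omega) (by omega)]
          have hmin : min p (m - i + 1) = m - i + 1 := by omega
          rw [hmin, map_add_pyRange]
          have : i + (m - i + 1) = m + 1 := by omega
          rw [this]
          simp
    · rw [coverLoopA, dif_neg (by omega), PySem.List.pyRange_one_eq_nil (by omega)]
      simp

-- ===== VERDICT (by name: the statement is the Claim_ definition above) =====
theorem compute_cover_positions_spec : Claim_equal_compute_cover_positions := by
  intro m p _ hpre
  unfold Spec_compute_cover_positions compute_cover_positions compute_cover_positions_alt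
  rcases hpre with hp | hm
  · exact loop_eq (m + 1 - p).toNat m p p 0 hp le_rfl (by ring) le_rfl
  · by_cases hp : 1 ≤ p
    · exact loop_eq (m + 1 - p).toNat m p p 0 hp le_rfl (by ring) le_rfl
    · rw [coverLoopA, dif_neg (by omega), PySem.List.pyRange_one_eq_nil (by omega)]
      simp
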